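-- pv_equiv track=rewrite | github.com/jkalleberg/DV-TrioTrain | triotrain/model_training/pipeline/resources.py | process_resource
-- ===== SOURCE A (Python) =====
-- def process_resource(txt: str) -> str:
--     """
--     Handle any special characters and remove any separators.
--
--     Input: 'A,Quick brown-fox jumped-over-the   lazy-dog'
--     Output: 'AQuickbrownfoxjumpedoverthelazydog'
--     """
--     specialChars = "!#$%^&*()"
--     for specialChar in specialChars:
--         txt = txt.replace(specialChar, "")
--     standardizeSeps = " -,_"
--     for sep in standardizeSeps:
--         txt = txt.replace(sep, "")
--     return txt
-- ===== SOURCE B (Python) =====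
-- def process_resource(txt: str) -> str:
--     """Single filtering pass over txt with a set of the characters to drop."""
--     removeset = set("!#$%^&*() -,_")
--     return "".join(c for c in txt if c not in removeset)
-- ===== Notes on version B (the rewrite author's own statement) =====
-- stated objective: simpler
-- what changed: Replaces thirteen sequential str.replace full scans with one filtering pass over the string backed by a precomputed set of characters to remove.
import Mathlib
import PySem

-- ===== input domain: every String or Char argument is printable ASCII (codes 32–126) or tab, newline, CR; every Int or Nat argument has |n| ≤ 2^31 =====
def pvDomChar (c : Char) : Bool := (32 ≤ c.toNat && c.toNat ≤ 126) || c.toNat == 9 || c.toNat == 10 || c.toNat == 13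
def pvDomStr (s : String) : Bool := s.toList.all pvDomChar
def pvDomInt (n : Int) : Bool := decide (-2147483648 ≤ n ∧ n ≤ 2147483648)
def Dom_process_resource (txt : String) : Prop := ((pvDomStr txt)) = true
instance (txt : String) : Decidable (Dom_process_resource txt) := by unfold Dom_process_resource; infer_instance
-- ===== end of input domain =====

-- B replaces A's thirteen sequential str.replace scans with one filtering pass over a set (objective: simpler).
-- ===== PORT A =====
def process_resource (txt : String) : String :=
  -- for specialChar in "!#$%^&*()": txt = txt.replace(specialChar, "")
  let txt := "!#$%^&*()".toList.foldl (fun t c => PySem.Str.replace t (String.ofList [c]) "") txt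
  -- for sep in " -,_": txt = txt.replace(sep, "")
  let txt := " -,_".toList.foldl (fun t c => PySem.Str.replace t (String.ofList [c]) "") txt
  txt

-- ===== PORT B =====
def process_resource_alt (txt : String) : String :=
  let removeset : PySem.Set Char := PySem.Set.ofList "!#$%^&*() -,_".toList
  String.ofList (txt.toList.filter (fun c => !(removeset.contains c)))

-- ===== PRECONDITION & SPEC =====
def Spec_process_resource (txt : String) (out : String) : Prop := out = process_resource_alt txt
instance (txt : String) (out : String) : Decidable (Spec_process_resource txt out) := by unfold Spec_process_resource; infer_instance

-- ===== CLAIM (what is proved, stated in full; the proofs are below) =====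
def Claim_equal_process_resource : Prop := ∀ (txt : String), Dom_process_resource txt → Spec_process_resource txt (process_resource txt)

-- ===== LEMMAS AND PROOFS =====

-- ===== VERDICT (by name: the statement is the Claim_ definition above) =====
-- replace of a single char by "" is exactly a filter
theorem replace_go_single (c : Char) : ∀ (fuel : Nat) (l acc : List Char), l.length ≤ fuel →
    PySem.Chars.replace.go [c] [] fuel l acc = acc.reverse ++ l.filter (· ≠ c) := by
  intro fuel
  induction fuel with
  | zero => intro l acc h; cases l <;> simp_all [PySem.Chars.replace.go]
  | succ n ih =>
    intro l acc h
    cases l with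
    | nil => simp [PySem.Chars.replace.go]
    | cons a t =>
      simp only [PySem.Chars.replace.go, List.isPrefixOf, Bool.and_true]
      by_cases hac : c = a
      · rw [if_pos (by simp [hac])]
        simp only [List.length_cons] at h
        rw [ih _ _ (by simpa using Nat.le_of_succ_le_succ h)]
        simp [List.filter, hac]
      · rw [if_neg (by simp [hac])]
        simp only [List.length_cons] at h
        rw [ih _ _ (Nat.le_of_succ_le_succ h)]
        have : decide (a ≠ c) = true := by simp; exact fun hh => hac hh.symm
        simp [List.filter, this]

theorem replace_single_eq_filter (s : List Char) (c : Char) :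
    PySem.Chars.replace s [c] [] = s.filter (· ≠ c) := by
  simp [PySem.Chars.replace]
  rw [replace_go_single c s.length s [] le_rfl]
  simp

theorem str_replace_single (t : String) (c : Char) :
    (PySem.Str.replace t (String.ofList [c]) "").toList = t.toList.filter (· ≠ c) := by
  rw [PySem.Str.toList_replace]
  have h : (String.ofList [c]).toList = [c] := String.toList_ofList
  have h2 : ("" : String).toList = [] := rfl
  rw [h, h2, replace_single_eq_filter]

theorem foldl_replace_filter (cs : List Char) : ∀ (t : String),
    ((cs.foldl (fun t c => PySem.Str.replace t (String.ofList [c]) "") t)).toList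
      = t.toList.filter (fun x => !cs.contains x) := by
  induction cs with
  | nil => intro t; simp
  | cons c cs ih =>
    intro t
    simp only [List.foldl_cons]
    rw [ih, str_replace_single, List.filter_filter]
    congr 1
    funext x
    simp only [List.contains_cons, Bool.not_or, Bool.and_comm]
    cases hx : (x == c) <;> simp_all

-- ===== VERDICT (by name: the statement is the Claim_ definition above) =====
theorem process_resource_spec : Claim_equal_process_resource := by
  intro txt _
  unfold Spec_process_resource process_resource process_resource_alt
  apply String.ext
  rw [foldl_replace_filter, foldl_replace_filter]
  have hL : ("!#$%^&*() -,_" : String).toList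
      = ("!#$%^&*()" : String).toList ++ (" -,_" : String).toList := rfl
  have hmk : ∀ (l : List Char), (String.ofList l).toList = l := fun l => String.toList_ofList
  dsimp only
  rw [hmk, List.filter_filter]
  conv_rhs => rw [String.toList_ofList]
  apply List.filter_congr
  intro x _
  rw [PySem.Set.contains_eq_listContains, hL]
  simp [PySem.Set.mem_ofList, Bool.and_assoc, Bool.and_comm, Bool.and_left_comm]
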